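-- pv_equiv track=rewrite | github.com/ElchaabiMohamed/InferCode_SVM | Du-42487-python-files/program_37354.py | find_position_of_smallest
-- ===== SOURCE A (Python) =====
-- def find_position_of_smallest(a,i):
-- 	p = i
-- 	j = i
-- 	while j < len(a):
-- 		if a[j] < a[p]:
-- 			p = j
-- 		j = j + 1
-- 	return p
-- ===== SOURCE B (Python) =====
-- def find_position_of_smallest(a, i):
--     if i >= len(a):
--         return i
--     s = a[i:]
--     return i + s.index(min(s))
-- ===== Notes on version B (the rewrite author's own statement) =====
-- stated objective: idiomatic
-- what changed: Replaces A's single stateful argmin scan (tracking a best index p while comparing a[j] < a[p]) with two library passes: take the suffix once, reduce it to its minimum value with min(), then locate that value's first occurrence with list.index.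
-- outside the precondition, e.g. on find_position_of_smallest([3, 1, 2], -1): A returns 1, B returns -1
import Mathlib
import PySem

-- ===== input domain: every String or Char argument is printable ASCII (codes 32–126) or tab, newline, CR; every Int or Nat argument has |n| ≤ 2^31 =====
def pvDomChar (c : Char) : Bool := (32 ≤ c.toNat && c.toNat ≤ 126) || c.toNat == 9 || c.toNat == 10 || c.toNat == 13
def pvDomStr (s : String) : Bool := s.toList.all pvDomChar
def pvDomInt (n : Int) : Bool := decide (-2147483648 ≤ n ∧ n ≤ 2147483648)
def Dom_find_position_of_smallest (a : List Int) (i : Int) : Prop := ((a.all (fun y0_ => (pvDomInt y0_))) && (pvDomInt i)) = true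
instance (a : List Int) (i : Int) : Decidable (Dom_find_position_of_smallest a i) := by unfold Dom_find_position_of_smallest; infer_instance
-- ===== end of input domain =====

-- B replaces A's stateful best-index scan by two library passes (min of the suffix, then
-- first-occurrence search); same O(n) cost, idiomatic decomposition.

-- ===== PORT A =====
-- A's while loop 'j = i; while j < len(a): …; j += 1' is the iteration of j over
-- range(i, len(a)) carrying the state p; a[j] / a[p] are in range whenever 0 ≤ i (Pre_),
-- so pyGetD's default 0 is never consulted on admitted inputs.
def find_position_of_smallest (a : List Int) (i : Int) : Int :=
  (PySem.List.pyRange i (a.length : Int) 1).foldl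
    (fun p j => if PySem.List.pyGetD a j 0 < PySem.List.pyGetD a p 0 then j else p) i

-- ===== PORT B =====
def find_position_of_smallest_alt (a : List Int) (i : Int) : Int :=
  if (a.length : Int) ≤ i then i
  else
    let s := PySem.List.slice a (some i) none   -- a[i:]
    match PySem.List.min? s (fun x => x) with   -- min(s); none only for s = [], unreachable here
    | none => i
    | some m =>
      match PySem.List.index? s m with          -- s.index(m); m ∈ s, so never none
      | none => i
      | some k => i + (k : Int)

-- ===== PRECONDITION & SPEC =====
-- Pre_ excludes negative i, on which A's behaviour is accidental: for i < -len(a) (a nonempty)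
-- A raises IndexError, and for -len(a) ≤ i < 0 A scans with negative-index wraparound
-- (comparing wrapped elements), an artefact B does not reproduce.
def Pre_find_position_of_smallest (a : List Int) (i : Int) : Prop := 0 ≤ i
instance (a : List Int) (i : Int) : Decidable (Pre_find_position_of_smallest a i) := by
  unfold Pre_find_position_of_smallest; infer_instance

def pvWitness_find_position_of_smallest : List Int × Int := ([3, 1, 2], 0)

def Spec_find_position_of_smallest (a : List Int) (i : Int) (out : Int) : Prop :=
  out = find_position_of_smallest_alt a i
instance (a : List Int) (i : Int) (out : Int) : Decidable (Spec_find_position_of_smallest a i out) := by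
  unfold Spec_find_position_of_smallest; infer_instance

-- ===== CLAIM (what is proved, stated in full; the proofs are below) =====
def Claim_equal_find_position_of_smallest : Prop :=
  ∀ (a : List Int) (i : Int), Dom_find_position_of_smallest a i →
    Pre_find_position_of_smallest a i →
    Spec_find_position_of_smallest a i (find_position_of_smallest a i)

-- ===== LEMMAS AND PROOFS =====

-- the fold over a min-suffix is bounded by its seed
lemma foldl_min_le_init (t : List Int) (x : Int) : t.foldl min x ≤ x := by
  induction t generalizing x with
  | nil => simp
  | cons y t ih => exact le_trans (ih (min x y)) (min_le_left _ _)

lemma idxOf?_of_mem (m : Int) (s : List Int) (h : m ∈ s) : s.idxOf? m = some (s.idxOf m) := by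
  induction s with
  | nil => simp at h
  | cons x t ih =>
    by_cases hx : x = m
    · simp [hx, List.idxOf?_cons]
    · have hm : m ∈ t := by
        rcases List.mem_cons.mp h with h' | h'
        · exact absurd h'.symm hx
        · exact h'
      simp [List.idxOf?_cons, hx, ih hm]

lemma min?_nil_int : PySem.List.min? ([] : List Int) (fun y => y) = none := by
  simp [PySem.List.min?]

-- characterisation of A's loop: folding the comparison step from index j with seed p yields
-- the first position of the suffix minimum when it beats the seed's value, else the seed.
lemma loopA_char (a : List Int) :
    ∀ (s : List Int) (j : Nat) (p : Int), s = a.drop j → j ≤ a.length →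
    (PySem.List.pyRange (j : Int) (a.length : Int) 1).foldl
      (fun p j => if PySem.List.pyGetD a j 0 < PySem.List.pyGetD a p 0 then j else p) p =
    match PySem.List.min? s (fun x => x) with
    | none => p
    | some m => if m < PySem.List.pyGetD a p 0 then (j : Int) + (s.idxOf m : Int) else p := by
  intro s
  induction s with
  | nil =>
    intro j p hs hj
    have hjlen : j = a.length := by
      have := congrArg List.length hs
      simp at this; omega
    subst hjlen
    rw [PySem.List.pyRange_one_eq_nil (le_refl _)]
    simp [PySem.List.min?]
  | cons x t ih =>
    intro j p hs hj
    have hjlt : j < a.length := by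
      have := congrArg List.length hs
      simp at this; omega
    have hx : a[j] = x := by
      have h0 : (a.drop j)[0]? = some x := by rw [← hs]; rfl
      rw [List.getElem?_drop] at h0
      have h1 : a[j]? = some x := by simpa using h0
      rw [List.getElem?_eq_getElem hjlt] at h1
      exact Option.some.inj h1
    have ht : t = a.drop (j + 1) := by
      have : (a.drop j).tail = a.drop (j + 1) := by
        rw [List.tail_drop]
      rw [← hs] at this
      simpa using this
    have hgj : PySem.List.pyGetD a (j : Int) 0 = x := by
      rw [PySem.List.pyGetD_natCast, List.getD_eq_getElem a 0 hjlt]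
      exact hx
    have hcons : PySem.List.pyRange (j : Int) (a.length : Int) 1 =
        (j : Int) :: PySem.List.pyRange ((j : Int) + 1) (a.length : Int) 1 :=
      PySem.List.pyRange_one_cons (by exact_mod_cast hjlt)
    have hcast : ((j : Int) + 1) = (((j + 1 : Nat)) : Int) := by push_cast; ring
    rw [hcons]
    rw [List.foldl_cons]
    set v := PySem.List.pyGetD a p 0 with hv
    by_cases hxv : x < v
    · -- the new element beats the seed: state becomes j
      have hstep : (if PySem.List.pyGetD a (j:Int) 0 < PySem.List.pyGetD a p 0 then (j:Int) else p) = (j:Int) := by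
        rw [hgj, ← hv]; simp [hxv]
      rw [hstep, hcast, ih (j+1) (j:Int) ht (by omega)]
      cases t with
      | nil => simp [min?_nil_int, PySem.List.min?_id_cons, hxv]
      | cons y t' =>
        rw [PySem.List.min?_id_cons, PySem.List.min?_id_cons]
        have hfold : (y :: t').foldl min x = min x (t'.foldl min y) := by
          rw [List.foldl_cons]; exact List.foldl_assoc
        set mt := t'.foldl min y with hmt
        by_cases hmx : mt < x
        · have hm : (y :: t').foldl min x = mt := by rw [hfold]; omega
          have hne : ¬ (x = mt) := by omega
          have hidx : (x :: y :: t').idxOf mt = (y :: t').idxOf mt + 1 := by simp [hne]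
          simp only [hm, hgj]
          rw [if_pos hmx, if_pos (by omega : mt < v), hidx]
          push_cast; ring
        · have hm : (y :: t').foldl min x = x := by rw [hfold]; omega
          simp only [hm, hgj]
          rw [if_neg hmx, if_pos hxv]
          simp
    · -- seed survives the comparison
      have hstep : (if PySem.List.pyGetD a (j:Int) 0 < PySem.List.pyGetD a p 0 then (j:Int) else p) = p := by
        rw [hgj, ← hv]; simp [hxv]
      rw [hstep, hcast, ih (j+1) p ht (by omega)]
      cases t with
      | nil => simp [min?_nil_int, PySem.List.min?_id_cons, hxv]
      | cons y t' =>
        rw [PySem.List.min?_id_cons, PySem.List.min?_id_cons]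
        have hfold : (y :: t').foldl min x = min x (t'.foldl min y) := by
          rw [List.foldl_cons]; exact List.foldl_assoc
        set mt := t'.foldl min y with hmt
        by_cases hmv : mt < v
        · have hm : (y :: t').foldl min x = mt := by rw [hfold]; omega
          have hne : ¬ (x = mt) := by omega
          have hidx : (x :: y :: t').idxOf mt = (y :: t').idxOf mt + 1 := by simp [hne]
          simp only [hm]
          rw [if_pos hmv, if_pos hmv, hidx]
          push_cast; ring
        · have hm2 : ¬ ((y :: t').foldl min x < v) := by rw [hfold]; omega
          simp only [← hv]
          rw [if_neg hmv, if_neg hm2]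

theorem find_position_of_smallest_spec : Claim_equal_find_position_of_smallest := by
  intro a i _ hp
  unfold Spec_find_position_of_smallest find_position_of_smallest find_position_of_smallest_alt
  have hi : 0 ≤ i := hp
  obtain ⟨j, rfl⟩ : ∃ j : Nat, i = (j : Int) := ⟨i.toNat, by omega⟩
  by_cases hlen : (a.length : Int) ≤ (j : Int)
  · rw [PySem.List.pyRange_one_eq_nil hlen]
    simp [hlen]
  · have hjlt : j < a.length := by omega
    rw [if_neg hlen]
    have hslice : PySem.List.slice a (some (j : Int)) none = a.drop j := by
      rw [PySem.List.slice_from a (by positivity)]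
      simp
    obtain ⟨x, t, hs⟩ : ∃ x t, a.drop j = x :: t := by
      cases hd : a.drop j with
      | nil =>
        have := congrArg List.length hd
        simp at this; omega
      | cons x t => exact ⟨x, t, rfl⟩
    have hchar := loopA_char a (x :: t) j (j : Int) hs.symm (by omega)
    rw [hchar]
    have hgi : PySem.List.pyGetD a (j : Int) 0 = x := by
      rw [PySem.List.pyGetD_natCast, List.getD_eq_getElem a 0 hjlt]
      have h0 : (a.drop j)[0]? = some x := by rw [hs]; rfl
      rw [List.getElem?_drop] at h0
      have h1 : a[j]? = some x := by simpa using h0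
      rw [List.getElem?_eq_getElem hjlt] at h1
      exact Option.some.inj h1
    simp only [hslice, hs]
    have hmem : t.foldl min x ∈ x :: t := PySem.List.min?_mem (by rw [PySem.List.min?_id_cons])
    simp only [PySem.List.min?_id_cons, PySem.List.index?_eq_idxOf?,
      idxOf?_of_mem (t.foldl min x) (x :: t) hmem, hgi]
    have hmx : t.foldl min x ≤ x := foldl_min_le_init t x
    by_cases hcase : t.foldl min x < x
    · rw [if_pos hcase]
    · have hmx' : t.foldl min x = x := by omega
      rw [if_neg hcase, hmx']
      simp
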